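-- pv_equiv track=rewrite | github.com/sandheepgopinath/Code-Repository | Development/Basics/Python/2Dspace.py | moveN
-- ===== SOURCE A (Python) =====
-- moveLeft =lambda x,y: [x-1,y]
--
-- moveRight=lambda x,y: [x+1,y]
--
-- moveUp=lambda x,y:[x,y+1]
--
-- moveDown=lambda x,y:[x,y-1]
--
-- def moveN(start,n,listToAppend,direction):
--     """ Function to move in either of the four directions by any number
--         start: a list of length 2 with starting cordinates
--         n : Number of steps to be moved
--         listToAppend : the list with all cordinates through which movement happens
--         direction ={'l': to move to left,'u': to move up,'d': to move down,'r': to move right}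
--         """
--     for i in range(n):
--         if direction=='l':
--             nextPosition=moveLeft(start[0],start[1])
--         elif direction=='r':
--             nextPosition=moveRight(start[0],start[1])
--         elif direction=='u':
--             nextPosition=moveUp(start[0],start[1])
--         elif direction=='d':
--             nextPosition=moveDown(start[0],start[1])
--         listToAppend.append(nextPosition)
--
--         start=nextPosition
--     endPosition=start
--     return listToAppend,endPosition
-- ===== SOURCE B (Python) =====
-- def moveN(start, n, listToAppend, direction):
--     """Closed-form re-implementation: pick one (dx, dy) delta, build all n
--     coordinates by an indexed formula and compute the end position directly,
--     instead of chaining start = nextPosition step by step.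
--     Like A, it extends listToAppend in place and returns it."""
--     if n > 0:
--         if direction == 'l':
--             dx, dy = -1, 0
--         elif direction == 'r':
--             dx, dy = 1, 0
--         elif direction == 'u':
--             dx, dy = 0, 1
--         elif direction == 'd':
--             dx, dy = 0, -1
--         x, y = start[0], start[1]
--         listToAppend.extend([x + (i + 1) * dx, y + (i + 1) * dy] for i in range(n))
--         return listToAppend, [x + n * dx, y + n * dy]
--     return listToAppend, start
-- ===== Notes on version B (the rewrite author's own statement) =====
-- stated objective: simpler
-- what changed: Replaces the chained accumulator loop (start = nextPosition each step, re-reading start[0]/start[1] and re-testing the direction every iteration) with a single delta selection and a closed-form indexed comprehension; the end position is computed directly as start + n*delta.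
import Mathlib
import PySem

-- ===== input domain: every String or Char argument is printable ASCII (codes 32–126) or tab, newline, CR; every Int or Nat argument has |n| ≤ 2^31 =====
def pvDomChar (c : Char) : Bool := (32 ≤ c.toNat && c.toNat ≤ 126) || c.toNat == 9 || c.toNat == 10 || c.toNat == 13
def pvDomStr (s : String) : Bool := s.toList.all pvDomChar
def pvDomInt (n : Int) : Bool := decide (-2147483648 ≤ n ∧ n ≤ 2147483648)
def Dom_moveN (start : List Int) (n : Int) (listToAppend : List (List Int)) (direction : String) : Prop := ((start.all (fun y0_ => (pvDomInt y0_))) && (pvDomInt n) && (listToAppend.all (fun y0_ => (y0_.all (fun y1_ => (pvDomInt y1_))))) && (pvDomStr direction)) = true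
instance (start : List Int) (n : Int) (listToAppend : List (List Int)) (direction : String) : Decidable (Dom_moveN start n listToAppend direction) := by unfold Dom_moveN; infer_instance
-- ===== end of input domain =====

-- B replaces A's chained accumulator loop by a single delta selection and a
-- closed-form indexed list (objective: simpler). Equivalence is about the
-- RETURN value; both Pythons mutate/extend listToAppend in place identically.


-- ===== PORT A =====
def moveLeft (x y : Int) : List Int := [x - 1, y]
def moveRight (x y : Int) : List Int := [x + 1, y]
def moveUp (x y : Int) : List Int := [x, y + 1]
def moveDown (x y : Int) : List Int := [x, y - 1]

-- loop body of A's 'for i in range(n)'; start[0]/start[1] via pyGet? (getD 0 is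
-- never reached inside Pre_, where the index is in range), and the final else
-- branch (invalid direction: Python's UnboundLocalError) lies outside Pre_.
def moveNStep (direction : String) (st : List (List Int) × List Int) (_ : Int) : List (List Int) × List Int :=
  let x := (PySem.List.pyGet? st.2 0).getD 0
  let y := (PySem.List.pyGet? st.2 1).getD 0
  let nextPosition :=
    if direction = "l" then moveLeft x y
    else if direction = "r" then moveRight x y
    else if direction = "u" then moveUp x y
    else if direction = "d" then moveDown x y
    else st.2
  (st.1 ++ [nextPosition], nextPosition)

def moveN (start : List Int) (n : Int) (listToAppend : List (List Int)) (direction : String) : List (List Int) × List Int :=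
  let st := (PySem.List.pyRange 0 n 1).foldl (moveNStep direction) (listToAppend, start)
  (st.1, st.2)

-- ===== PORT B =====
def moveN_alt (start : List Int) (n : Int) (listToAppend : List (List Int)) (direction : String) : List (List Int) × List Int :=
  if 0 < n then
    -- invalid direction here is Python's NameError (outside Pre_)
    let d : Int × Int :=
      if direction = "l" then (-1, 0)
      else if direction = "r" then (1, 0)
      else if direction = "u" then (0, 1)
      else if direction = "d" then (0, -1)
      else (0, 0)
    let x := (PySem.List.pyGet? start 0).getD 0
    let y := (PySem.List.pyGet? start 1).getD 0
    (listToAppend ++ (PySem.List.pyRange 0 n 1).map (fun i => [x + (i + 1) * d.1, y + (i + 1) * d.2]),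
     [x + n * d.1, y + n * d.2])
  else (listToAppend, start)

-- ===== PRECONDITION & SPEC =====
-- Pre_ excludes exactly the inputs where A raises: with n > 0, an invalid
-- direction (UnboundLocalError) or a start list shorter than 2 (IndexError);
-- B raises on exactly the same inputs.
def Pre_moveN (start : List Int) (n : Int) (listToAppend : List (List Int)) (direction : String) : Prop :=
  n ≤ 0 ∨ ((direction = "l" ∨ direction = "r" ∨ direction = "u" ∨ direction = "d") ∧ 2 ≤ start.length)
instance (start : List Int) (n : Int) (listToAppend : List (List Int)) (direction : String) : Decidable (Pre_moveN start n listToAppend direction) := by unfold Pre_moveN; infer_instance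
def pvWitness_moveN : List Int × Int × List (List Int) × String := ([3, 4], 2, [[0, 0]], "l")

def Spec_moveN (start : List Int) (n : Int) (listToAppend : List (List Int)) (direction : String) (out : List (List Int) × List Int) : Prop := out = moveN_alt start n listToAppend direction
instance (start : List Int) (n : Int) (listToAppend : List (List Int)) (direction : String) (out : List (List Int) × List Int) : Decidable (Spec_moveN start n listToAppend direction out) := by unfold Spec_moveN; infer_instance

-- ===== CLAIM (what is proved, stated in full; the proofs are below) =====
def Claim_equal_moveN : Prop := ∀ (start : List Int) (n : Int) (listToAppend : List (List Int)) (direction : String), Dom_moveN start n listToAppend direction → Pre_moveN start n listToAppend direction → Spec_moveN start n listToAppend direction (moveN start n listToAppend direction)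

-- ===== LEMMAS AND PROOFS =====

-- generic step: one move by (dx, dy)
def stepG (dx dy : Int) (st : List (List Int) × List Int) (_ : Int) : List (List Int) × List Int :=
  let x := (PySem.List.pyGet? st.2 0).getD 0
  let y := (PySem.List.pyGet? st.2 1).getD 0
  (st.1 ++ [[x + dx, y + dy]], [x + dx, y + dy])

lemma moveNStep_l : moveNStep "l" = stepG (-1) 0 := by
  funext st i; simp [moveNStep, stepG, moveLeft, sub_eq_add_neg]
lemma moveNStep_r : moveNStep "r" = stepG 1 0 := by
  funext st i; simp [moveNStep, stepG, moveRight]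
lemma moveNStep_u : moveNStep "u" = stepG 0 1 := by
  funext st i; simp [moveNStep, stepG, moveUp]
lemma moveNStep_d : moveNStep "d" = stepG 0 (-1) := by
  funext st i; simp [moveNStep, stepG, moveDown, sub_eq_add_neg]

lemma loopG (dx dy : Int) : ∀ (l : List Int) (acc : List (List Int)) (x y : Int),
    l.foldl (stepG dx dy) (acc, [x, y]) =
      (acc ++ (List.range l.length).map
          (fun i : Nat => ([x + ((i : Int) + 1) * dx, y + ((i : Int) + 1) * dy] : List Int)),
       [x + (l.length : Int) * dx, y + (l.length : Int) * dy]) := by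
  intro l
  induction l with
  | nil => intro acc x y; simp
  | cons hd tl ih =>
      intro acc x y
      have h0 : stepG dx dy (acc, [x, y]) hd = (acc ++ [[x + dx, y + dy]], [x + dx, y + dy]) := by
        simp [stepG]
      rw [List.foldl_cons, h0, ih]
      simp only [Prod.mk.injEq]
      refine ⟨?_, ?_⟩
      · rw [List.append_assoc]
        congr 1
        rw [List.length_cons, List.range_succ_eq_map, List.map_cons, List.map_map]
        simp only [List.singleton_append]
        congr 1
        · norm_num
        · apply List.map_congr_left
          intro i _
          simp only [Function.comp_apply, List.cons.injEq, and_true]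
          refine ⟨?_, ?_⟩ <;> push_cast <;> ring
      · simp only [List.length_cons, List.cons.injEq, and_true]
        refine ⟨?_, ?_⟩ <;> push_cast <;> ring

-- the whole loop of A, for a valid delta, from an initial position a :: b :: rest
lemma loopA (dx dy n : Int) (hn : 0 < n) (L : List (List Int)) (a b : Int) (rest : List Int) :
    (PySem.List.pyRange 0 n 1).foldl (stepG dx dy) (L, a :: b :: rest) =
      (L ++ (PySem.List.pyRange 0 n 1).map (fun i => [a + (i + 1) * dx, b + (i + 1) * dy]),
       [a + n * dx, b + n * dy]) := by
  have h0 : stepG dx dy (L, a :: b :: rest) 0 = (L ++ [[a + dx, b + dy]], [a + dx, b + dy]) := by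
    simp [stepG]
  have hc : (((n - 1).toNat : Int)) = n - 1 := by omega
  rw [PySem.List.pyRange_one_cons hn, List.foldl_cons, h0, loopG]
  simp only [zero_add, PySem.List.length_pyRange_one, Prod.mk.injEq]
  refine ⟨?_, ?_⟩
  · rw [List.append_assoc]
    congr 1
    rw [List.map_cons, PySem.List.pyRange_one 1 n, List.map_map]
    simp only [List.singleton_append]
    congr 1
    · norm_num
    · apply List.map_congr_left
      intro i _
      simp only [Function.comp_apply, List.cons.injEq, and_true]
      refine ⟨?_, ?_⟩ <;> (try push_cast) <;> ring_nf
  · simp only [List.cons.injEq, and_true, hc]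
    refine ⟨?_, ?_⟩ <;> ring

-- ===== VERDICT (by name: the statement is the Claim_ definition above) =====
theorem moveN_spec : Claim_equal_moveN := by
  intro start n L direction _ hpre
  unfold Spec_moveN
  by_cases hn : 0 < n
  · rcases hpre with hle | ⟨hdir, hlen⟩
    · omega
    obtain ⟨a, b, rest, rfl⟩ : ∃ a b rest, start = a :: b :: rest := by
      match start, hlen with
      | a :: b :: rest, _ => exact ⟨a, b, rest, rfl⟩
    have hx : (PySem.List.pyGet? (a :: b :: rest) 0).getD 0 = a := by
      simp [PySem.List.pyGet?_zero_cons]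
    have hy : (PySem.List.pyGet? (a :: b :: rest) 1).getD 0 = b := by simp
    rcases hdir with rfl | rfl | rfl | rfl <;>
      simp only [moveN, moveN_alt, if_pos hn, moveNStep_l, moveNStep_r, moveNStep_u, moveNStep_d,
        loopA _ _ n hn, hx, hy, String.reduceEq, reduceIte, if_true]
  · have hle : n ≤ 0 := by omega
    have hr : PySem.List.pyRange 0 n 1 = [] := PySem.List.pyRange_one_eq_nil (by omega)
    simp [moveN, moveN_alt, hr, hn]
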